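-- pv_equiv track=rewrite | github.com/smartbugs/smartbugs | sb/parser.py | str2label
-- ===== SOURCE A (Python) =====
-- def str2label(s):
--     """Convert string to label.
--
--     The label is constructed as follows:
--     - letters and digits remain unaffected
--     - other leading or trailing characters are removed
--     - sequences of other characters occurring inbetween are replaced by a single underscore
--     """
--     l = []
--     sep = False
--     ch = False
--     for c in s: # or "in s.lower()" (convert to lowercase)?
--         if c.isalnum(): # "or c in '-'", to allow for - and maybe other characters?
--             if sep:
--                 l.append('_')
--                 sep = False
--             l.append(c)
--             ch = True
--         else:
--             sep = ch
--     return ''.join(l)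
-- ===== SOURCE B (Python) =====
-- def str2label(s):
--     words = []
--     cur = ''
--     for c in s:
--         if c.isalnum():
--             cur += c
--         elif cur:
--             words.append(cur)
--             cur = ''
--     if cur:
--         words.append(cur)
--     return '_'.join(words)
-- ===== Notes on version B (the rewrite author's own statement) =====
-- stated objective: idiomatic
-- what changed: B collects maximal alnum runs as whole words and joins them with a single underscore, instead of A's per-character emission driven by sep/ch boolean flags.
import Mathlib
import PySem

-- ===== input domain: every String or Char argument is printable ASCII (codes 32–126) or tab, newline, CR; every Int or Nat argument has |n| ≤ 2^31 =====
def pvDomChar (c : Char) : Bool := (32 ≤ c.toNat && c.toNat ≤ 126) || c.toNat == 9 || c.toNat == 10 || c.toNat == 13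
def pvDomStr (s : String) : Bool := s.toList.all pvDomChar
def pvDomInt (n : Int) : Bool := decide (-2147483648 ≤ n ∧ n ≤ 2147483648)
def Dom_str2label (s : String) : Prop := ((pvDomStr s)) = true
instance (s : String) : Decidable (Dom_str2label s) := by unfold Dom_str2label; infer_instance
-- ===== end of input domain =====

-- B collects whole alnum words and joins them with '_'; A emits characters one by one under sep/ch flags. Equivalence proved on all inputs.

-- ===== PORT A =====
def str2label (s : String) : String :=
  let st := s.toList.foldl (fun (st : List Char × Bool × Bool) c =>
    let (l, sep, ch) := st
    if PySem.Chars.isalnum c then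
      ((if sep then l ++ ['_'] else l) ++ [c], false, true)
    else (l, ch, ch)) ([], false, false)
  String.ofList st.1

-- ===== PORT B =====
def str2label_alt (s : String) : String :=
  let st := s.toList.foldl (fun (st : List (List Char) × List Char) c =>
    if PySem.Chars.isalnum c then (st.1, st.2 ++ [c])
    else if st.2 ≠ [] then (st.1 ++ [st.2], []) else st) ([], [])
  let words := if st.2 ≠ [] then st.1 ++ [st.2] else st.1
  String.ofList (List.intercalate ['_'] words)

-- ===== PRECONDITION & SPEC =====
def Spec_str2label (s : String) (out : String) : Prop := out = str2label_alt s
instance (s : String) (out : String) : Decidable (Spec_str2label s out) := by unfold Spec_str2label; infer_instance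

-- ===== CLAIM (what is proved, stated in full; the proofs are below) =====
def Claim_equal_str2label : Prop := ∀ (s : String), Dom_str2label s → Spec_str2label s (str2label s)

-- ===== LEMMAS AND PROOFS =====

def pvStepA (st : List Char × Bool × Bool) (c : Char) : List Char × Bool × Bool :=
  let (l, sep, ch) := st
  if PySem.Chars.isalnum c then
    ((if sep then l ++ ['_'] else l) ++ [c], false, true)
  else (l, ch, ch)

def pvStepB (st : List (List Char) × List Char) (c : Char) : List (List Char) × List Char :=
  if PySem.Chars.isalnum c then (st.1, st.2 ++ [c])
  else if st.2 ≠ [] then (st.1 ++ [st.2], []) else st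

-- encode a B-state as the corresponding A-state
def pvEnc (ws : List (List Char)) (cur : List Char) : List Char × Bool × Bool :=
  (List.intercalate ['_'] (ws ++ if cur = [] then [] else [cur]),
   decide (ws ≠ [] ∧ cur = []), decide (ws ≠ [] ∨ cur ≠ []))

theorem pv_intercalate_append (ws : List (List Char)) (y : List Char) :
    List.intercalate ['_'] (ws ++ [y]) =
      if ws = [] then y else List.intercalate ['_'] ws ++ '_' :: y := by
  induction ws with
  | nil => simp [List.intercalate]
  | cons a t ih =>
    cases t with
    | nil => simp [List.intercalate, List.intersperse]
    | cons b t' =>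
      simp only [List.cons_append, List.intercalate, List.intersperse] at *
      simp_all

theorem pv_flat_append (ws : List (List Char)) (y : List Char) :
    (List.intersperse ['_'] (ws ++ [y])).flatten =
      if ws = [] then y else (List.intersperse ['_'] ws).flatten ++ '_' :: y := by
  have h := pv_intercalate_append ws y
  simpa [List.intercalate] using h

theorem pv_enc_step (ws : List (List Char)) (cur : List Char) (c : Char) :
    pvStepA (pvEnc ws cur) c = pvEnc (pvStepB (ws, cur) c).1 (pvStepB (ws, cur) c).2 := by
  by_cases ha : PySem.Chars.isalnum c = true
  · by_cases hc : cur = []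
    · by_cases hw : ws = [] <;>
        simp [pvStepA, pvStepB, pvEnc, ha, hc, hw, pv_flat_append, List.intercalate]
    · by_cases hw : ws = [] <;>
        simp [pvStepA, pvStepB, pvEnc, ha, hc, hw, pv_flat_append, List.intercalate]
  · by_cases hc : cur = []
    · simp [pvStepA, pvStepB, pvEnc, ha, hc]
    · simp [pvStepA, pvStepB, pvEnc, ha, hc]

theorem pv_fold (cs : List Char) : ∀ (ws : List (List Char)) (cur : List Char),
    cs.foldl pvStepA (pvEnc ws cur)
      = pvEnc (cs.foldl pvStepB (ws, cur)).1 (cs.foldl pvStepB (ws, cur)).2 := by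
  induction cs with
  | nil => intro ws cur; rfl
  | cons c cs ih =>
    intro ws cur
    simp only [List.foldl_cons, pv_enc_step]
    exact ih _ _

-- ===== VERDICT (by name: the statement is the Claim_ definition above) =====
theorem str2label_spec : Claim_equal_str2label := by
  intro s _
  show str2label s = str2label_alt s
  have hA : str2label s = String.ofList (s.toList.foldl pvStepA ([], false, false)).1 := rfl
  have hB : str2label_alt s = String.ofList (List.intercalate ['_']
      (let st := s.toList.foldl pvStepB ([], [])
       if st.2 ≠ [] then st.1 ++ [st.2] else st.1)) := rfl
  rw [hA, hB]
  have h0 : pvEnc [] [] = (([] : List Char), false, false) := by simp [pvEnc, List.intercalate]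
  rw [← h0, pv_fold]
  obtain ⟨ws, cur⟩ := s.toList.foldl pvStepB ([], [])
  by_cases hc : cur = [] <;> simp [pvEnc, hc, List.intercalate]
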